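-- pv_equiv track=rewrite | github.com/teaparty2213/MLF | src/gray_code.py | gray_code_dif_bit
-- ===== SOURCE A (Python) =====
-- def gray_code_dif_bit(a, b): # a and b are gray codes of two adjacent integers
--     dif = a ^ b
--     dif_pos = 0 # position of the different bit from LSB
--     while (dif > 0):
--         if (dif & 1):
--             return dif_pos
--         dif = dif >> 1
--         dif_pos += 1
--     return -1
-- ===== SOURCE B (Python) =====
-- def gray_code_dif_bit(a, b): # a and b are gray codes of two adjacent integers
--     dif = a ^ b
--     if dif <= 0:
--         return -1
--     return (dif & -dif).bit_length() - 1
-- ===== Notes on version B (the rewrite author's own statement) =====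
-- stated objective: simpler
-- what changed: Replaces the iterative LSB-scan loop with a constant-time bit trick: isolate the lowest set bit of a^b with dif & -dif and take its bit_length minus one, returning -1 when a^b <= 0 exactly as the loop does.
import Mathlib
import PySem

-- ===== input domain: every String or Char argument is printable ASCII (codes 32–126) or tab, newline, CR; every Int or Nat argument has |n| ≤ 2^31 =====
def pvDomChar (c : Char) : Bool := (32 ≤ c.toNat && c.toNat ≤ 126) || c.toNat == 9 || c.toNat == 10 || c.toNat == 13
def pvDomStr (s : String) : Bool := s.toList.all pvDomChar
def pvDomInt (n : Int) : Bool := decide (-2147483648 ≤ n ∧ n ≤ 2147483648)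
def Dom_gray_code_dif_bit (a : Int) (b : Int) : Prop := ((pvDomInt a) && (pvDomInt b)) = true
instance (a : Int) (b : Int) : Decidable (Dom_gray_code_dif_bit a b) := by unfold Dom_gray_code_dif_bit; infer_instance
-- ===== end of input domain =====

-- B replaces A's LSB-scan loop with the bit trick (dif & -dif).bit_length() - 1 (same values, simpler).


-- ===== PORT A =====
-- the while-loop of A: state (dif, dif_pos)
def grayLoop (dif : Int) (pos : Int) : Int :=
  if h : 0 < dif then
    if PySem.Int.band dif 1 ≠ 0 then pos
    else grayLoop (dif >>> (1 : Nat)) (pos + 1)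
  else -1
termination_by dif.toNat
decreasing_by
  rw [← Int.toNat_of_nonneg (le_of_lt h), ← Int.natCast_shiftRight, Int.toNat_natCast,
    Int.toNat_natCast, Nat.shiftRight_one]
  omega

def gray_code_dif_bit (a : Int) (b : Int) : Int :=
  grayLoop (PySem.Int.bxor a b) 0

-- ===== PORT B =====
-- bit_length n for n > 0 is PySem.Int.bitLength n, so low.bit_length() - 1 is bitLength low - 1
def gray_code_dif_bit_alt (a : Int) (b : Int) : Int :=
  let dif := PySem.Int.bxor a b
  if dif ≤ 0 then -1
  else (PySem.Int.bitLength (PySem.Int.band dif (-dif)) : Int) - 1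

-- ===== PRECONDITION & SPEC =====
def Spec_gray_code_dif_bit (a : Int) (b : Int) (out : Int) : Prop := out = gray_code_dif_bit_alt a b
instance (a : Int) (b : Int) (out : Int) : Decidable (Spec_gray_code_dif_bit a b out) := by unfold Spec_gray_code_dif_bit; infer_instance

-- ===== CLAIM (what is proved, stated in full; the proofs are below) =====
def Claim_equal_gray_code_dif_bit : Prop := ∀ (a : Int) (b : Int), Dom_gray_code_dif_bit a b → Spec_gray_code_dif_bit a b (gray_code_dif_bit a b)

-- ===== LEMMAS AND PROOFS =====
-- for odd numbers, and-ing with the predecessor keeps every bit but the lowest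
theorem land_odd_pred (m : Nat) : (2 * m + 1) &&& (2 * m) = 2 * m := by
  apply Nat.eq_of_testBit_eq
  intro i
  cases i with
  | zero => simp [Nat.testBit_zero, Nat.mul_mod_right]
  | succ j =>
      have h1 : (2 * m + 1) / 2 = m := by omega
      have h2 : (2 * m) / 2 = m := by omega
      rw [Nat.testBit_land]
      simp [Nat.testBit_succ, h1, h2]

-- doubling commutes with the 'clear lowest set bit' operation
theorem land_double_pred (m : Nat) (hm : 0 < m) :
    (2 * m) &&& (2 * m - 1) = 2 * (m &&& (m - 1)) := by
  apply Nat.eq_of_testBit_eq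
  intro i
  cases i with
  | zero => simp [Nat.testBit_zero, Nat.mul_mod_right]
  | succ j =>
      have h1 : (2 * m) / 2 = m := by omega
      have h2 : (2 * m - 1) / 2 = m - 1 := by omega
      have h3 : (2 * (m &&& (m - 1))) / 2 = m &&& (m - 1) := by omega
      rw [Nat.testBit_land]
      simp [Nat.testBit_succ, h2, h3]

-- on a positive n, Python's n & -n is n - (n & (n-1))
theorem band_neg_self (n : Nat) (hn : 0 < n) :
    PySem.Int.band (n : Int) (-(n : Int)) = ((n - (n &&& (n - 1)) : Nat) : Int) := by
  have h1 : ¬ ((0 : Int) ≤ -(n : Int)) := by omega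
  have h2 : (0 : Int) ≤ (n : Int) := by omega
  simp only [PySem.Int.band, h1, h2, if_pos, if_neg, not_false_iff]
  have h3 : (-(-(n : Int)) - 1).toNat = n - 1 := by omega
  have h4 : ((n : Int)).toNat = n := by omega
  rw [h3, h4]

-- the loop computes pos + bitLength (n - (n &&& (n-1))) - 1 on positive n
theorem grayLoop_eq (n : Nat) (hn : 0 < n) : ∀ pos : Int,
    grayLoop (n : Int) pos =
      pos + (PySem.Int.bitLength ((n - (n &&& (n - 1)) : Nat) : Int) : Int) - 1 := by
  induction n using Nat.strong_induction_on with
  | _ n ih =>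
    intro pos
    rcases Nat.even_or_odd n with ⟨m, hm⟩ | ⟨m, hm⟩
    · -- even: n = 2*m, m > 0
      have hm2 : n = 2 * m := by omega
      have hmpos : 0 < m := by omega
      rw [grayLoop]
      have hpos : (0 : Int) < (n : Int) := by exact_mod_cast hn
      rw [dif_pos hpos]
      have hband : PySem.Int.band (n : Int) 1 = 0 := by
        rw [show ((1 : Int)) = ((1 : Nat) : Int) from rfl, PySem.Int.band_natCast,
          Nat.and_one_is_mod]
        omega
      rw [if_neg (by simp [hband])]
      have hshift : ((n : Int) >>> (1 : Nat)) = ((m : Nat) : Int) := by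
        rw [← Int.natCast_shiftRight, Nat.shiftRight_one]
        congr 1; omega
      rw [hshift, ih m (by omega) hmpos (pos + 1)]
      have hfm : 0 < m - (m &&& (m - 1)) := by
        have := Nat.and_le_right (n := m) (m := m - 1); omega
      have hfn : n - (n &&& (n - 1)) = 2 * (m - (m &&& (m - 1))) := by
        have := land_double_pred m hmpos
        have hle : m &&& (m - 1) ≤ m - 1 := Nat.and_le_right
        rw [hm2, this]; omega
      rw [hfn]
      have hbl : PySem.Int.bitLength ((2 * (m - (m &&& (m - 1))) : Nat) : Int)
          = PySem.Int.bitLength ((m - (m &&& (m - 1)) : Nat) : Int) + 1 := by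
        have := PySem.Int.bitLength_natCast (m := 2 * (m - (m &&& (m - 1)))) (by omega)
        rwa [show (2 * (m - (m &&& (m - 1)))) / 2 = m - (m &&& (m - 1)) by omega] at this
      rw [hbl]
      push_cast
      ring
    · -- odd: n = 2*m + 1
      rw [grayLoop]
      have hpos : (0 : Int) < (n : Int) := by exact_mod_cast hn
      rw [dif_pos hpos]
      have hband : PySem.Int.band (n : Int) 1 = 1 := by
        rw [show ((1 : Int)) = ((1 : Nat) : Int) from rfl, PySem.Int.band_natCast,
          Nat.and_one_is_mod]
        omega
      rw [if_pos (by simp [hband])]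
      have hfn : n - (n &&& (n - 1)) = 1 := by
        have := land_odd_pred m
        have h1 : n - 1 = 2 * m := by omega
        rw [hm, h1] at *
        omega
      rw [hfn]
      norm_num [show PySem.Int.bitLength (1 : Int) = 1 from by decide]

-- ===== VERDICT (by name: the statement is the Claim_ definition above) =====
theorem gray_code_dif_bit_spec : Claim_equal_gray_code_dif_bit := by
  intro a b _
  unfold Spec_gray_code_dif_bit gray_code_dif_bit gray_code_dif_bit_alt
  set dif := PySem.Int.bxor a b with hd
  by_cases h : dif ≤ 0
  · rw [grayLoop, dif_neg (by omega)]
    simp [h]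
  · have hpos : 0 < dif := by omega
    have hn : dif = ((dif.toNat : Nat) : Int) := by omega
    rw [if_neg h, hn, grayLoop_eq dif.toNat (by omega) 0,
      band_neg_self dif.toNat (by omega)]
    ring
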